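-- pv_equiv track=rewrite | github.com/mctinker/Map-Tasker | maptasker/src/guimap.py | ignore_line
-- ===== SOURCE A (Python) =====
-- def ignore_line(line: str) -> bool:
--     """
--     Check if a given line of HTML should be ignored.
--
--     Args:
--         line (str): The line of HTML to check.
--
--     Returns:
--         bool: True if the line should be ignored, False otherwise.
--     """
--     text_to_ignore = [
--         "<style>",
--         "<tr> ",
--         "<table>",
--         "<td></td>",
--         "<a id=",
--         "Trailing Information...",
--         "Scenes",
--         "mark {",
--         "background-color: ",
--         "{color: ",
--         "padding: 5px;",
--         "{display: ",
--     ]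
--     # Ignore certain lines
--     return any(ignore_str in line for ignore_str in text_to_ignore)
-- ===== SOURCE B (Python) =====
-- _NEEDLES = (
--     "<style>",
--     "<tr> ",
--     "<table>",
--     "<td></td>",
--     "<a id=",
--     "Trailing Information...",
--     "Scenes",
--     "mark {",
--     "background-color: ",
--     "{color: ",
--     "padding: 5px;",
--     "{display: ",
-- )
--
--
-- def ignore_line(line: str) -> bool:
--     # Single left-to-right pass: at each position, test whether any of the
--     # literals begins there, instead of twelve independent substring scans.
--     for j in range(len(line) + 1):
--         for s in _NEEDLES:
--             if line.startswith(s, j):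
--                 return True
--     return False
-- ===== Notes on version B (the rewrite author's own statement) =====
-- stated objective: alternative
-- what changed: A runs twelve independent substring-membership scans over the line; B makes a single left-to-right pass over the positions of the line, testing at each position whether any of the twelve literals starts there and returning on the first hit.
import Mathlib
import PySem

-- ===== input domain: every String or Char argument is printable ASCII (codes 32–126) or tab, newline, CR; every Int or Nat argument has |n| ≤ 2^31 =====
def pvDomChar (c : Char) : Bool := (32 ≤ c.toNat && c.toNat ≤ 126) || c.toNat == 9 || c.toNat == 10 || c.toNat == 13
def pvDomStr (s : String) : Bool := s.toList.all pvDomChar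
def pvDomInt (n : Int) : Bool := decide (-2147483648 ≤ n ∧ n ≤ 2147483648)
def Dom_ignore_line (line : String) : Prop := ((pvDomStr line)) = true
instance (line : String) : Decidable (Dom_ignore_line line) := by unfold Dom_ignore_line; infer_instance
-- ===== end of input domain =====

-- B replaces twelve independent substring scans by one left-to-right pass that
-- tests at each position whether any of the literals starts there (alternative, same cost class).


-- ===== PORT A =====
def pvTextToIgnore : List String :=
  ["<style>", "<tr> ", "<table>", "<td></td>", "<a id=",
   "Trailing Information...", "Scenes", "mark {", "background-color: ",
   "{color: ", "padding: 5px;", "{display: "]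

-- any(ignore_str in line for ignore_str in text_to_ignore)
def ignore_line (line : String) : Bool :=
  pvTextToIgnore.any (fun ignore_str => PySem.Str.isIn ignore_str line)

-- ===== PORT B =====
def pvNeedles : List (List Char) := pvTextToIgnore.map String.toList

-- the inner loop at one position: does any needle start at the head of cs?
def pvHitHere (cs : List Char) : Bool :=
  pvNeedles.any (fun n => n.isPrefixOf cs)

-- the outer loop: walk the suffixes of the line, stop at the first hit
def pvScan : List Char → Bool
  | [] => pvHitHere []
  | c :: t => pvHitHere (c :: t) || pvScan t

def ignore_line_alt (line : String) : Bool := pvScan line.toList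

-- ===== PRECONDITION & SPEC =====
def Spec_ignore_line (line : String) (out : Bool) : Prop := out = ignore_line_alt line
instance (line : String) (out : Bool) : Decidable (Spec_ignore_line line out) := by unfold Spec_ignore_line; infer_instance

-- ===== CLAIM (what is proved, stated in full; the proofs are below) =====
def Claim_equal_ignore_line : Prop := ∀ (line : String), Dom_ignore_line line → Spec_ignore_line line (ignore_line line)

-- ===== LEMMAS AND PROOFS =====
theorem pvScan_iff (cs : List Char) :
    pvScan cs = true ↔ ∃ n ∈ pvNeedles, n <:+: cs := by
  induction cs with
  | nil =>
    simp only [pvScan, pvHitHere, List.any_eq_true, List.infix_nil]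
    constructor
    · rintro ⟨n, hn, hp⟩
      exact ⟨n, hn, List.prefix_nil.mp (List.isPrefixOf_iff_prefix.mp hp)⟩
    · rintro ⟨n, hn, rfl⟩
      exact ⟨[], hn, rfl⟩
  | cons c t ih =>
    simp only [pvScan, Bool.or_eq_true, pvHitHere, List.any_eq_true,
      List.isPrefixOf_iff_prefix, ih]
    constructor
    · rintro (⟨n, hn, hp⟩ | ⟨n, hn, hi⟩)
      · exact ⟨n, hn, hp.isInfix⟩
      · exact ⟨n, hn, List.infix_cons hi⟩
    · rintro ⟨n, hn, hi⟩
      rcases List.infix_cons_iff.mp hi with hp | hi'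
      · exact Or.inl ⟨n, hn, hp⟩
      · exact Or.inr ⟨n, hn, hi'⟩

-- ===== VERDICT (by name: the statement is the Claim_ definition above) =====
theorem ignore_line_spec : Claim_equal_ignore_line := by
  intro line _
  unfold Spec_ignore_line ignore_line ignore_line_alt
  rcases h : pvScan line.toList with _ | _
  · rw [Bool.eq_false_iff]
    intro hany
    rcases List.any_eq_true.mp hany with ⟨s, hs, hin⟩
    have : s.toList <:+: line.toList := (PySem.Str.isIn_iff_infix _ _).mp hin
    have : pvScan line.toList = true :=
      (pvScan_iff _).mpr ⟨s.toList, List.mem_map_of_mem hs, this⟩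
    simp [h] at this
  · rcases (pvScan_iff _).mp h with ⟨n, hn, hi⟩
    rcases List.mem_map.mp hn with ⟨s, hs, rfl⟩
    exact List.any_eq_true.mpr ⟨s, hs, (PySem.Str.isIn_iff_infix _ _).mpr hi⟩
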